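-- pv_equiv track=rewrite | github.com/elizaOS/benchmarks | openclaw-memory-bench/src/openclaw_memory_bench/hybrid.py | failure_breakdown
-- ===== SOURCE A (Python) =====
-- from typing import Any
--
-- def failure_breakdown(failures: list[dict[str, Any]]) -> dict[str, dict[str, int]]:
--     by_code: dict[str, int] = {}
--     by_category: dict[str, int] = {}
--     by_phase: dict[str, int] = {}
--
--     for row in failures:
--         code = str(row.get("error_code") or "UNKNOWN")
--         category = str(row.get("error_category") or "unknown")
--         phase = str(row.get("phase") or "unknown")
--         by_code[code] = by_code.get(code, 0) + 1
--         by_category[category] = by_category.get(category, 0) + 1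
--         by_phase[phase] = by_phase.get(phase, 0) + 1
--
--     return {"by_code": by_code, "by_category": by_category, "by_phase": by_phase}
-- ===== SOURCE B (Python) =====
-- def failure_breakdown(failures: list[dict[str, object]]) -> dict[str, dict[str, int]]:
--     def tally(field: str, default: str) -> dict[str, int]:
--         keys = [str(row.get(field) or default) for row in failures]
--         return {k: keys.count(k) for k in dict.fromkeys(keys)}
--
--     return {
--         "by_code": tally("error_code", "UNKNOWN"),
--         "by_category": tally("error_category", "unknown"),
--         "by_phase": tally("phase", "unknown"),
--     }
-- ===== Notes on version B (the rewrite author's own statement) =====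
-- stated objective: idiomatic
-- what changed: One interleaved loop maintaining three dicts is replaced by three independent staged passes: each breakdown extracts its key list, dedups it in first-appearance order with dict.fromkeys, and counts occurrences per distinct key.
import Mathlib
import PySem

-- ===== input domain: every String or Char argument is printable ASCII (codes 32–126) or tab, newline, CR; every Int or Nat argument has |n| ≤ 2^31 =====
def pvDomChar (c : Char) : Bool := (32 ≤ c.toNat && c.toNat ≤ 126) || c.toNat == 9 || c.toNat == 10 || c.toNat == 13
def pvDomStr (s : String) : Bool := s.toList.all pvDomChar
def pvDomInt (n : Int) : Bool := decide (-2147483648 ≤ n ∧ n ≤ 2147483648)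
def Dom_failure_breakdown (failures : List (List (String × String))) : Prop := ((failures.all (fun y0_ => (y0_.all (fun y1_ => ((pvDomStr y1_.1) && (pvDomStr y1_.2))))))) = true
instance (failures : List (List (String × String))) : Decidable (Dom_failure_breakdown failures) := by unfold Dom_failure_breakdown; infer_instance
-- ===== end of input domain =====

-- B: three independent staged passes (key list → ordered dedup → per-key count) instead of A's single interleaved loop over three dicts.

-- ===== PORT A =====
-- str(row.get(field) or default): a missing key or an empty string falls back to the default; str on a str is the identity
def pvKeyA (row : List (String × String)) (field dflt : String) : String :=
  match (PySem.Dict.mk row).get? field with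
  | some s => if s = "" then dflt else s
  | none => dflt

def failure_breakdown (failures : List (List (String × String))) : List (String × List (String × Int)) :=
  let st := failures.foldl
    (fun (st : PySem.Dict String Int × PySem.Dict String Int × PySem.Dict String Int) row =>
      let code := pvKeyA row "error_code" "UNKNOWN"
      let category := pvKeyA row "error_category" "unknown"
      let phase := pvKeyA row "phase" "unknown"
      (st.1.insert code (st.1.getD code 0 + 1),
       st.2.1.insert category (st.2.1.getD category 0 + 1),
       st.2.2.insert phase (st.2.2.getD phase 0 + 1)))
    (PySem.Dict.empty, PySem.Dict.empty, PySem.Dict.empty)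
  [("by_code", st.1.items), ("by_category", st.2.1.items), ("by_phase", st.2.2.items)]

-- ===== PORT B =====
def pvKeyB (row : List (String × String)) (field dflt : String) : String :=
  match row.find? (fun p => p.1 == field) with
  | some p => if p.2 = "" then dflt else p.2
  | none => dflt

def pvTally (failures : List (List (String × String))) (field dflt : String) : List (String × Int) :=
  let keys := failures.map (fun row => pvKeyB row field dflt)
  (PySem.List.dedup keys).map (fun k => (k, (keys.count k : Int)))

def failure_breakdown_alt (failures : List (List (String × String))) : List (String × List (String × Int)) :=
  [("by_code", pvTally failures "error_code" "UNKNOWN"),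
   ("by_category", pvTally failures "error_category" "unknown"),
   ("by_phase", pvTally failures "phase" "unknown")]

-- ===== PRECONDITION & SPEC =====
def Spec_failure_breakdown (failures : List (List (String × String))) (out : List (String × List (String × Int))) : Prop := out = failure_breakdown_alt failures
instance (failures : List (List (String × String))) (out : List (String × List (String × Int))) : Decidable (Spec_failure_breakdown failures out) := by unfold Spec_failure_breakdown; infer_instance

-- ===== CLAIM (what is proved, stated in full; the proofs are below) =====
def Claim_equal_failure_breakdown : Prop := ∀ (failures : List (List (String × String))), Dom_failure_breakdown failures → Spec_failure_breakdown failures (failure_breakdown failures)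

-- ===== LEMMAS AND PROOFS =====

-- A's triple fold is component-wise: each dict is the counting fold of its own key list
theorem triple_fold (l : List (List (String × String))) (d1 d2 d3 : PySem.Dict String Int) :
    l.foldl
      (fun (st : PySem.Dict String Int × PySem.Dict String Int × PySem.Dict String Int) row =>
        let code := pvKeyA row "error_code" "UNKNOWN"
        let category := pvKeyA row "error_category" "unknown"
        let phase := pvKeyA row "phase" "unknown"
        (st.1.insert code (st.1.getD code 0 + 1),
         st.2.1.insert category (st.2.1.getD category 0 + 1),
         st.2.2.insert phase (st.2.2.getD phase 0 + 1)))
      (d1, d2, d3)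
    = ((l.map (fun row => pvKeyA row "error_code" "UNKNOWN")).foldl
         (fun d x => d.insert x (d.getD x 0 + 1)) d1,
       (l.map (fun row => pvKeyA row "error_category" "unknown")).foldl
         (fun d x => d.insert x (d.getD x 0 + 1)) d2,
       (l.map (fun row => pvKeyA row "phase" "unknown")).foldl
         (fun d x => d.insert x (d.getD x 0 + 1)) d3) := by
  induction l generalizing d1 d2 d3 with
  | nil => rfl
  | cons r t ih => simp only [List.foldl, List.map]; exact ih _ _ _

-- the two key extractions agree: Dict.get? on an assoc list is its first match
theorem keyA_eq_keyB (row : List (String × String)) (field dflt : String) :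
    pvKeyA row field dflt = pvKeyB row field dflt := by
  induction row with
  | nil => rfl
  | cons p t ih =>
    unfold pvKeyA pvKeyB
    rw [PySem.Dict.get?_mk_cons, List.find?]
    by_cases h : p.1 == field
    · simp [h]
    · simp only [h]
      exact ih

-- one counting fold's items = one staged pass of B
theorem counter_items_eq_tally (failures : List (List (String × String))) (field dflt : String) :
    ((failures.map (fun row => pvKeyA row field dflt)).foldl
        (fun (d : PySem.Dict String Int) x => d.insert x (d.getD x 0 + 1)) PySem.Dict.empty).items
      = pvTally failures field dflt := by
  rw [PySem.Dict.foldl_insert_getD_add_one_eq_counter, PySem.Dict.items_counter]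
  simp [pvTally, keyA_eq_keyB]

-- ===== VERDICT (by name: the statement is the Claim_ definition above) =====
theorem failure_breakdown_spec : Claim_equal_failure_breakdown := by
  intro failures _
  show failure_breakdown failures = failure_breakdown_alt failures
  unfold failure_breakdown failure_breakdown_alt
  simp only [triple_fold, counter_items_eq_tally]
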